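-- pv_equiv track=rewrite | github.com/Karis-tlg/Py_Ex | DNC/KÍ TỰ QUẢNG BÁ.py | cstr
-- ===== SOURCE A (Python) =====
-- def cstr(s):
--     i = 0
--     n = len(s)
--     while i < n:
--         if s[i:i+3] == "FDD":
--             i += 3
--         elif s[i:i+2] == "FD":
--             i += 2
--         elif s[i] == "F":
--             i += 1
--         else:
--             return False
--     return True
-- ===== SOURCE B (Python) =====
-- def cstr(s):
--     # single pass with a budget of allowed trailing 'D's after each 'F'
--     budget = 0
--     for c in s:
--         if c == 'F':
--             budget = 2
--         elif c == 'D':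
--             if budget == 0:
--                 return False
--             budget -= 1
--         else:
--             return False
--     return True
-- ===== Notes on version B (the rewrite author's own statement) =====
-- stated objective: simpler
-- what changed: Replaced the index-jumping loop that greedily compares three-, two- and one-character slices by a single character pass maintaining an integer budget of how many D characters may still follow the last F.
import Mathlib
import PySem

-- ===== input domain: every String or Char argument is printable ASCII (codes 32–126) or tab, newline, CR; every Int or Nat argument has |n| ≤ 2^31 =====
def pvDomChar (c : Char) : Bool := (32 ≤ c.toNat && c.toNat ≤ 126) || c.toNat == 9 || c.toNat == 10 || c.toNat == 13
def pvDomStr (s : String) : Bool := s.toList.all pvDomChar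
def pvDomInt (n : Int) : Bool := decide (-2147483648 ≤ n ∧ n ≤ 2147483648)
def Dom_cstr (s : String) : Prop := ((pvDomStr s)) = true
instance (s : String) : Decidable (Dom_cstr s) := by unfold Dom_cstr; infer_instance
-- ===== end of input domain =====

-- B replaces A's greedy slice-comparison index jumps by a one-pass scan with a 'D'-budget counter; objective: simpler.

-- ===== PORT A =====
-- A's while loop over index i, ported as recursion on the remaining suffix (s[i:]):
-- slice comparisons s[i:i+3] / s[i:i+2] become take-prefix comparisons.
def cstrGo (l : List Char) : Bool :=
  if _h : l = [] then true
  else if l.take 3 = ['F', 'D', 'D'] then cstrGo (l.drop 3)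
  else if l.take 2 = ['F', 'D'] then cstrGo (l.drop 2)
  else if l.headI = 'F' then cstrGo (l.drop 1)
  else false
termination_by l.length
decreasing_by
  all_goals cases l <;> simp_all

def cstr (s : String) : Bool := cstrGo s.toList

-- ===== PORT B =====
def cstrAltGo : List Char → Nat → Bool
  | [], _ => true
  | c :: cs, b =>
    if c = 'F' then cstrAltGo cs 2
    else if c = 'D' then (if b = 0 then false else cstrAltGo cs (b - 1))
    else false

def cstr_alt (s : String) : Bool := cstrAltGo s.toList 0

-- ===== PRECONDITION & SPEC =====
def Spec_cstr (s : String) (out : Bool) : Prop := out = cstr_alt s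
instance (s : String) (out : Bool) : Decidable (Spec_cstr s out) := by unfold Spec_cstr; infer_instance

-- ===== CLAIM (what is proved, stated in full; the proofs are below) =====
def Claim_equal_cstr : Prop := ∀ (s : String), Dom_cstr s → Spec_cstr s (cstr s)

-- ===== LEMMAS AND PROOFS =====

-- the budget is irrelevant when the list does not start with 'D'
theorem altGo_budget_irrel (l : List Char) (b b' : Nat)
    (h : ∀ c cs, l = c :: cs → c ≠ 'D') : cstrAltGo l b = cstrAltGo l b' := by
  cases l with
  | nil => rfl
  | cons c cs =>
    have := h c cs rfl
    simp [cstrAltGo, this]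

theorem go_eq_altGo : ∀ (n : Nat) (l : List Char), l.length ≤ n → cstrGo l = cstrAltGo l 0 := by
  intro n
  induction n with
  | zero =>
    intro l hl
    have : l = [] := List.length_eq_zero_iff.mp (Nat.le_zero.mp hl)
    subst this; simp [cstrGo, cstrAltGo]
  | succ n ih =>
    intro l hl
    match l with
    | [] => simp [cstrGo, cstrAltGo]
    | c :: cs =>
      rw [cstrGo]
      by_cases hF : c = 'F'
      · subst hF
        simp only [cstrAltGo]
        match cs with
        | [] => simp [cstrAltGo, cstrGo]
        | d :: ds =>
          by_cases hD : d = 'D'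
          · subst hD
            match ds with
            | [] => simp [cstrAltGo, cstrGo]
            | e :: es =>
              by_cases hE : e = 'D'
              · subst hE
                rw [dif_neg (by simp), if_pos (by simp)]
                simp only [List.drop, cstrAltGo, if_neg (by decide : ¬('D' = 'F'))]
                norm_num
                exact ih es (by simp at hl ⊢; omega)
              · -- "FD" then a non-'D' (e): A takes branch 2, B spends one budget
                rw [dif_neg (by simp), if_neg (by simp [hE]), if_pos (by simp)]
                simp only [List.drop, cstrAltGo, if_neg (by decide : ¬('D' = 'F'))]
                norm_num
                rw [ih (e :: es) (by simp at hl ⊢; omega)]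
                simp [cstrAltGo, hE]
          · -- 'F' then non-'D': A takes branch 3, B's budget 2 unused
            rw [dif_neg (by simp), if_neg (by simp [hD]), if_neg (by simp [hD]),
              if_pos (by simp [List.headI])]
            rw [altGo_budget_irrel (d :: ds) 2 0 (fun c' cs' h' => by simp at h'; exact h'.1 ▸ hD)]
            exact ih (d :: ds) (by simp at hl ⊢; omega)
      · -- head is not 'F': A's three branches all fail, B returns false too
        rw [if_neg (by simp [hF]), if_neg (by simp [hF]), if_neg (by simp [List.headI, hF]),
          dif_neg (by simp)]
        by_cases hD : c = 'D'
        · subst hD; simp [cstrAltGo]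
        · simp [cstrAltGo, hF, hD]

-- ===== VERDICT (by name: the statement is the Claim_ definition above) =====
theorem cstr_spec : Claim_equal_cstr := by
  intro s _
  unfold Spec_cstr cstr cstr_alt
  exact go_eq_altGo s.toList.length s.toList le_rfl
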